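-- pv_equiv track=rewrite | github.com/pushpakjalan02/Genetic-Algorithm-Based-Cryptography | DecryptionKeyGeneration.py | getKeyMatrix
-- ===== SOURCE A (Python) =====
-- def getEBCDICEquivalent(data, charTable):
--     ebcdicEquivalent = []
--     for i in range(0, len(data)):
--         ebcdicEquivalent.append(charTable[data[i]])
--     return ebcdicEquivalent
--
-- def rightShiftByTwo(dataList):
--     rightShiftedData = []
--     for i in range(0, len(dataList)):
--         rightShiftedData.append(dataList[i] >> 2)
--     return rightShiftedData
--
-- def getKeyMatrix(key, charTable, columns):
--     ebcdicEquivalent = getEBCDICEquivalent(key, charTable)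
--     rightShiftedEBCDICEquivalent = rightShiftByTwo(ebcdicEquivalent)
--
--     keyMatrix = []
--     for i in range(0, len(rightShiftedEBCDICEquivalent), columns):
--         currentRow = []
--         for j in range(i, i + columns):
--             currentRow.append(rightShiftedEBCDICEquivalent[j])
--         keyMatrix.append(currentRow)
--
--     return keyMatrix
-- ===== SOURCE B (Python) =====
-- def getKeyMatrix(key, charTable, columns):
--     # One fused pass: build each row directly from the key characters,
--     # no intermediate EBCDIC / right-shifted full-length lists.
--     keyMatrix = []
--     for i in range(0, len(key), columns):
--         currentRow = []
--         for j in range(i, i + columns):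
--             currentRow.append(charTable[key[j]] >> 2)
--         keyMatrix.append(currentRow)
--     return keyMatrix
-- ===== Notes on version B (the rewrite author's own statement) =====
-- stated objective: simpler
-- what changed: The three passes (EBCDIC lookup list, right-shift list, reshape loop) are fused into a single traversal that builds each matrix row directly from the key characters, eliminating both intermediate full-length lists and the two helper functions.
import Mathlib
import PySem

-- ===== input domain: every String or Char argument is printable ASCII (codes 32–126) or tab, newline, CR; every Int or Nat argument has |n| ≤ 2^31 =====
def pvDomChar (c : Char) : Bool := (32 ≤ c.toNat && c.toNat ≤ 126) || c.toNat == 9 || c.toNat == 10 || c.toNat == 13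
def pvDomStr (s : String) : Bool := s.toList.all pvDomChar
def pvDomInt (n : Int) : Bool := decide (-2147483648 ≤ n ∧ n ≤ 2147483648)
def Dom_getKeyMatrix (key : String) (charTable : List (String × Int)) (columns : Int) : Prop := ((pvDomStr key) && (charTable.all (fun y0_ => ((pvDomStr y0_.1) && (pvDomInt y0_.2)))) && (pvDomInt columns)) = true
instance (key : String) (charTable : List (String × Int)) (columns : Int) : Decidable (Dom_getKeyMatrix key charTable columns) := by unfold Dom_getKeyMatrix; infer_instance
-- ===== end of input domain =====

-- B fuses A's three passes (EBCDIC lookup list, right-shift list, reshape loop) into one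
-- traversal building each row directly from the key characters; same values, no temporaries.


-- ===== PORT A =====
-- charTable[data[i]] : assoc-list first-match lookup; the default 0 is never reached inside
-- Pre_ (every key character has an entry), indexing is always in range inside the loops.
def pvGetEBCDICEquivalent (data : String) (charTable : List (String × Int)) : List Int :=
  (PySem.List.pyRange 0 (PySem.Str.len data) 1).foldl
    (fun acc i =>
      acc ++ [(List.lookup (PySem.List.pyGetD data.toList i ' ').toString charTable).getD 0]) []

def pvRightShiftByTwo (dataList : List Int) : List Int :=
  (PySem.List.pyRange 0 (dataList.length : Int) 1).foldl
    (fun acc i => acc ++ [(PySem.List.pyGetD dataList i 0) >>> (2 : Nat)]) []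

def getKeyMatrix (key : String) (charTable : List (String × Int)) (columns : Int) : List (List Int) :=
  let ebcdicEquivalent := pvGetEBCDICEquivalent key charTable
  let rightShifted := pvRightShiftByTwo ebcdicEquivalent
  (PySem.List.pyRange 0 (rightShifted.length : Int) columns).foldl
    (fun keyMatrix i =>
      keyMatrix ++
        [(PySem.List.pyRange i (i + columns) 1).foldl
          (fun row j => row ++ [PySem.List.pyGetD rightShifted j 0]) []]) []

-- ===== PORT B =====
def getKeyMatrix_alt (key : String) (charTable : List (String × Int)) (columns : Int) : List (List Int) :=
  (PySem.List.pyRange 0 (PySem.Str.len key) columns).foldl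
    (fun keyMatrix i =>
      keyMatrix ++
        [(PySem.List.pyRange i (i + columns) 1).foldl
          (fun row j =>
            row ++ [(List.lookup (PySem.List.pyGetD key.toList j ' ').toString charTable).getD 0 >>> (2 : Nat)]) []]) []

-- ===== PRECONDITION & SPEC =====
-- Exactly the inputs on which Python A returns: columns = 0 is a ValueError (range step 0),
-- a key character missing from charTable is a KeyError, and positive columns not dividing
-- len(key) hits an IndexError in the last row.
def Pre_getKeyMatrix (key : String) (charTable : List (String × Int)) (columns : Int) : Prop :=
  columns ≠ 0 ∧
  key.toList.all (fun c => (List.lookup c.toString charTable).isSome) = true ∧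
  (0 < columns → columns ∣ (key.toList.length : Int))
instance (key : String) (charTable : List (String × Int)) (columns : Int) : Decidable (Pre_getKeyMatrix key charTable columns) := by unfold Pre_getKeyMatrix; infer_instance

def pvWitness_getKeyMatrix : String × (List (String × Int)) × Int := ("ab", [("a", 100), ("b", 200)], 1)

def Spec_getKeyMatrix (key : String) (charTable : List (String × Int)) (columns : Int) (out : List (List Int)) : Prop := out = getKeyMatrix_alt key charTable columns
instance (key : String) (charTable : List (String × Int)) (columns : Int) (out : List (List Int)) : Decidable (Spec_getKeyMatrix key charTable columns out) := by unfold Spec_getKeyMatrix; infer_instance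

-- ===== CLAIM (what is proved, stated in full; the proofs are below) =====
def Claim_equal_getKeyMatrix : Prop := ∀ (key : String) (charTable : List (String × Int)) (columns : Int), Dom_getKeyMatrix key charTable columns → Pre_getKeyMatrix key charTable columns → Spec_getKeyMatrix key charTable columns (getKeyMatrix key charTable columns)

-- ===== LEMMAS AND PROOFS =====

-- A's first two passes amount to mapping one function over the key characters.
theorem pvEbcdic_eq_map (data : String) (t : List (String × Int)) :
    pvGetEBCDICEquivalent data t
      = data.toList.map (fun c => (List.lookup c.toString t).getD 0) := by
  unfold pvGetEBCDICEquivalent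
  rw [PySem.List.foldl_append_singleton_eq_map
        (fun i => (List.lookup (PySem.List.pyGetD data.toList i ' ').toString t).getD 0)]
  simp only [PySem.Str.len_eq, List.nil_append]
  have hcomp : (fun i => (List.lookup (PySem.List.pyGetD data.toList i ' ').toString t).getD 0)
      = (fun c => (List.lookup c.toString t).getD 0) ∘ (fun j => PySem.List.pyGetD data.toList j ' ') := rfl
  rw [hcomp, ← List.map_map, PySem.List.map_pyGetD_pyRange_zero']

theorem pvShift_eq_map (xs : List Int) :
    pvRightShiftByTwo xs = xs.map (fun v : Int => v >>> (2 : Nat)) := by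
  unfold pvRightShiftByTwo
  rw [PySem.List.foldl_append_singleton_eq_map (fun i => (PySem.List.pyGetD xs i 0) >>> (2 : Nat))]
  have hcomp : (fun i => (PySem.List.pyGetD xs i 0) >>> (2 : Nat))
      = (fun v : Int => v >>> (2 : Nat)) ∘ (fun j => PySem.List.pyGetD xs j 0) := rfl
  rw [List.nil_append, hcomp, ← List.map_map, PySem.List.map_pyGetD_pyRange_zero']

theorem pyRange_zero_neg_nil (n c : Int) (hn : 0 ≤ n) (hc : c < 0) :
    PySem.List.pyRange 0 n c = [] := by
  unfold PySem.List.pyRange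
  split_ifs with h1 h2 h3 <;> first | rfl | omega

-- ===== VERDICT (by name: the statement is the Claim_ definition above) =====
theorem getKeyMatrix_spec : Claim_equal_getKeyMatrix := by
  intro key charTable columns _hdom hpre
  obtain ⟨hc0, _hlk, hdvd⟩ := hpre
  unfold Spec_getKeyMatrix
  simp only [getKeyMatrix, getKeyMatrix_alt, pvEbcdic_eq_map, pvShift_eq_map, List.map_map,
    List.length_map, PySem.Str.len_eq]
  set F : Char → Int := (fun v : Int => v >>> (2 : Nat)) ∘ (fun c => (List.lookup c.toString charTable).getD 0) with hF
  set n : Int := (key.toList.length : Int) with hn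
  rcases lt_or_gt_of_ne hc0 with hneg | hpos
  · rw [pyRange_zero_neg_nil _ _ (by positivity) hneg]; rfl
  · have hd : columns ∣ n := hdvd hpos
    rw [PySem.List.foldl_append_singleton_eq_map, PySem.List.foldl_append_singleton_eq_map,
      List.nil_append, List.nil_append]
    apply List.map_congr_left
    intro i hi
    obtain ⟨hi0, hin, hidvd⟩ := (PySem.List.mem_pyRange_iff_of_pos hpos i).mp hi
    rw [PySem.List.foldl_append_singleton_eq_map, PySem.List.foldl_append_singleton_eq_map,
      List.nil_append, List.nil_append]
    apply List.map_congr_left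
    intro j hj
    obtain ⟨hji, hjc⟩ := (PySem.List.mem_pyRange_one).mp hj
    have hiub : i + columns ≤ n := by
      have hdvd2 : columns ∣ n - i := by
        simpa using dvd_sub hd (by simpa using hidvd)
      have := Int.le_of_dvd (by omega) hdvd2
      omega
    have hj0 : 0 ≤ j := by omega
    have hjn : j < n := by omega
    rw [PySem.List.pyGetD_eq_getElem _ _ hj0 (by simpa [hn] using hjn),
        PySem.List.pyGetD_eq_getElem _ _ hj0 (by simpa [hn] using hjn),
        List.getElem_map]
    rfl
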